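-- pv_equiv track=rewrite | github.com/FAF2nir/challenges | pretest/ppo.py | check6
-- ===== SOURCE A (Python) =====
-- def check6(o, n):
--     for i in range(len(o)-1):
--         if n == (o[:i] + o[i+1:]):
--             return False
--
--     if abs(len(o) - len(n)) == 0:
--         for i in range(len(o)-1):
--             if (n[:i] + n[i+1:]) == (o[:i] + o[i+1:]):
--                 return False
--
--     for i in range(len(o)-1):
--         if o == (n[:i] + n[i+1:]):
--             return False
--
--     return True
-- ===== SOURCE B (Python) =====
-- def check6(o, n):
--     # Standard one-pass "within one edit" check: scan to the first mismatch,
--     # then the remainders must match after skipping one character.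
--     if len(o) < len(n):
--         o, n = n, o
--     if len(o) - len(n) > 1:
--         return True
--     i = 0
--     while i < len(n) and o[i] == n[i]:
--         i += 1
--     if len(o) == len(n):
--         return o[i+1:] != n[i+1:]
--     return o[i+1:] != n[i:]
-- ===== Notes on version B (the rewrite author's own statement) =====
-- stated objective: faster
-- what changed: Replaced A's three loops that rebuild a sliced copy of the string at every index by the standard single scan to the first mismatch followed by one comparison of the remaining suffixes.
-- intended difference: A's loops stop at index len(o)-2, so on pairs that are one edit (deletion/substitution/insertion) apart only at the final position, and on equal strings of length <= 1, A returns True while B returns False, the intended 'within one edit' answer. — e.g. on check6("ab", "aa"): A returns true, B returns false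
import Mathlib
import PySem

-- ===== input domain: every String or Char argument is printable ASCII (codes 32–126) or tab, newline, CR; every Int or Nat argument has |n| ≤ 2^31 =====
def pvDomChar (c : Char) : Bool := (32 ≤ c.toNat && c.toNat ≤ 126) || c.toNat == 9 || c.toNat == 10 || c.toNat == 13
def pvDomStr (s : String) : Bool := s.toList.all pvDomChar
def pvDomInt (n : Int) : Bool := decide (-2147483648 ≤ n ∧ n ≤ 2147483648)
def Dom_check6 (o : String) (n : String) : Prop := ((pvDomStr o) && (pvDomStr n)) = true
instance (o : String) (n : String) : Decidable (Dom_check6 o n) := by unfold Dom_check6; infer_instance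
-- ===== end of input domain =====

-- B replaces A's three slice-rebuild scans by the standard one-pass "within one edit"
-- check (scan to the first mismatch, then compare the remaining suffixes); objective: faster.

-- ===== PORT A =====
-- literal transliteration: three 'for i in range(len(o)-1)' early-return loops, slices rebuilt each step
def check6 (o : String) (n : String) : Bool :=
  if (PySem.List.pyRange 0 ((o.toList.length : Int) - 1) 1).any (fun i =>
       n.toList == PySem.List.slice o.toList none (some i) ++ PySem.List.slice o.toList (some (i + 1)) none) then
    false
  else if (((o.toList.length : Int) - (n.toList.length : Int)).natAbs == 0 &&
      (PySem.List.pyRange 0 ((o.toList.length : Int) - 1) 1).any (fun i =>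
        PySem.List.slice n.toList none (some i) ++ PySem.List.slice n.toList (some (i + 1)) none
          == PySem.List.slice o.toList none (some i) ++ PySem.List.slice o.toList (some (i + 1)) none)) then
    false
  else if (PySem.List.pyRange 0 ((o.toList.length : Int) - 1) 1).any (fun i =>
       o.toList == PySem.List.slice n.toList none (some i) ++ PySem.List.slice n.toList (some (i + 1)) none) then
    false
  else
    true

-- ===== PORT B =====
-- Source B's 'while i < len(n) and o[i] == n[i]' scan (after the swap len(o) ≥ len(n))
def bScan : List Char → List Char → Nat
  | x :: xs, y :: ys => if x = y then bScan xs ys + 1 else 0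
  | _, _ => 0

def check6_alt (o : String) (n : String) : Bool :=
  -- 'if len(o) < len(n): o, n = n, o'
  let oc := if o.toList.length < n.toList.length then n.toList else o.toList
  let nc := if o.toList.length < n.toList.length then o.toList else n.toList
  if (oc.length : Int) - (nc.length : Int) > 1 then true
  else
    let i := bScan oc nc
    if oc.length = nc.length then
      !(PySem.List.slice oc (some ((i : Int) + 1)) none == PySem.List.slice nc (some ((i : Int) + 1)) none)
    else
      !(PySem.List.slice oc (some ((i : Int) + 1)) none == PySem.List.slice nc (some (i : Int)) none)

-- ===== PRECONDITION & SPEC =====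
-- A's loops stop at index len(o)-2, so A returns True on pairs that are one edit
-- (deletion/substitution/insertion) apart only at the final position(s), and on equal
-- strings of length ≤ 1; B returns False there, the intended "within one edit" answer.
def D_check6 (o : String) (n : String) : Prop :=
  let v := o.toList
  let w := n.toList
  let e := w.drop (w.length - 1) <:+ v
  (w.length ≤ v.length ∧ v.dropLast <+: w ∧ (v.length ≤ 1 ∨ ¬ e))
  ∨ (w.length = v.length + 1 ∧ (w.dropLast <+: v ∨ (v.dropLast <+: w ∧ e)) ∧
      ¬ w.drop (w.length - 2) <:+ v)
instance (o : String) (n : String) : Decidable (D_check6 o n) := by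
  unfold D_check6; infer_instance

def Spec_check6 (o : String) (n : String) (out : Bool) : Prop := ¬ D_check6 o n → out = check6_alt o n
instance (o : String) (n : String) (out : Bool) : Decidable (Spec_check6 o n out) := by unfold Spec_check6; infer_instance

def pvDiffWitness_check6 : String × String := ("ab", "aa")
def pvDiffWitnessOut_check6 : Bool × Bool := (true, false)

-- ===== CLAIM (what is proved, stated in full; the proofs are below) =====
def Claim_unchanged_check6 : Prop := ∀ (o : String) (n : String), Dom_check6 o n → Spec_check6 o n (check6 o n)
def Claim_changed_check6 : Prop := Dom_check6 (pvDiffWitness_check6.1) (pvDiffWitness_check6.2) ∧ D_check6 (pvDiffWitness_check6.1) (pvDiffWitness_check6.2) ∧ check6 (pvDiffWitness_check6.1) (pvDiffWitness_check6.2) = pvDiffWitnessOut_check6.1 ∧ check6_alt (pvDiffWitness_check6.1) (pvDiffWitness_check6.2) = pvDiffWitnessOut_check6.2 ∧ pvDiffWitnessOut_check6.1 ≠ pvDiffWitnessOut_check6.2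
def Claim_exact_check6 : Prop := ∀ (o : String) (n : String), Dom_check6 o n → D_check6 o n → check6 o n ≠ check6_alt o n

-- ===== LEMMAS AND PROOFS =====

theorem bScan_comm (xs ys : List Char) : bScan xs ys = bScan ys xs := by
  induction xs generalizing ys with
  | nil => cases ys <;> simp [bScan]
  | cons x xs ih =>
    cases ys with
    | nil => simp [bScan]
    | cons y ys =>
      by_cases h : x = y <;> simp [bScan, h, ih, eq_comm]

theorem bScan_le_left (xs ys : List Char) : bScan xs ys ≤ xs.length := by
  induction xs generalizing ys with
  | nil => simp [bScan]
  | cons x xs ih =>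
    cases ys with
    | nil => simp [bScan]
    | cons y ys =>
      by_cases h : x = y <;> simp [bScan, h]
      exact ih ys

theorem bScan_le_right (xs ys : List Char) : bScan xs ys ≤ ys.length := by
  rw [bScan_comm]; exact bScan_le_left ys xs

theorem bScan_self (xs : List Char) : bScan xs xs = xs.length := by
  induction xs with
  | nil => simp [bScan]
  | cons x xs ih => simp [bScan, ih]

theorem bScan_take_iff (xs ys : List Char) (i : Nat)
    (hx : i ≤ xs.length) (hy : i ≤ ys.length) :
    xs.take i = ys.take i ↔ i ≤ bScan xs ys := by
  induction i generalizing xs ys with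
  | zero => simp
  | succ i ih =>
    cases xs with
    | nil => simp at hx
    | cons x xs =>
      cases ys with
      | nil => simp at hy
      | cons y ys =>
        by_cases h : x = y
        · subst h
          have hpl : bScan (x :: xs) (x :: ys) = bScan xs ys + 1 := by simp [bScan]
          simp only [List.take_succ_cons, List.cons.injEq, hpl, true_and]
          rw [ih xs ys (by simpa using hx) (by simpa using hy)]
          omega
        · have hpl : bScan (x :: xs) (y :: ys) = 0 := by simp [bScan, h]
          simp [hpl, h]

theorem drop_eq_iff (xs ys : List Char) (a b : Nat)
    (ha : a ≤ xs.length) (hb : b ≤ ys.length)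
    (ht : xs.length - a = ys.length - b) :
    xs.drop a = ys.drop b ↔ xs.length - a ≤ bScan xs.reverse ys.reverse := by
  rw [← bScan_take_iff xs.reverse ys.reverse (xs.length - a)
        (by simp only [List.length_reverse]; omega) (by simp only [List.length_reverse]; omega),
      ← List.reverse_drop, ht, ← List.reverse_drop]
  constructor
  · intro h; rw [h]
  · intro h; exact List.reverse_injective h

-- 'ys = xs with index j deleted', for j+1 < |xs|, characterised by prefix/suffix scan lengths
theorem del_eq_iff (xs ys : List Char) (j : Nat) (hj : j + 1 < xs.length) :
    (ys = xs.take j ++ xs.drop (j + 1)) ↔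
      (ys.length + 1 = xs.length ∧ j ≤ bScan xs ys ∧
        xs.length - 1 - j ≤ bScan xs.reverse ys.reverse) := by
  constructor
  · intro h
    have hlen : ys.length + 1 = xs.length := by rw [h]; simp; omega
    refine ⟨hlen, ?_, ?_⟩
    · rw [← bScan_take_iff xs ys j (by omega) (by omega)]
      rw [h, List.take_append_of_le_length (by simp; omega), List.take_take]
      simp
    · have h2 : ys.drop j = xs.drop (j + 1) := by
        rw [h, List.drop_left' (by simp; omega)]
      have := (drop_eq_iff xs ys (j + 1) j (by omega) (by omega) (by omega)).mp h2.symm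
      omega
  · rintro ⟨hlen, hp, hs⟩
    have h1 : xs.take j = ys.take j :=
      (bScan_take_iff xs ys j (by omega) (by omega)).mpr hp
    have h2 : xs.drop (j + 1) = ys.drop j :=
      (drop_eq_iff xs ys (j + 1) j (by omega) (by omega) (by omega)).mpr (by omega)
    calc ys = ys.take j ++ ys.drop j := (List.take_append_drop j ys).symm
      _ = xs.take j ++ xs.drop (j + 1) := by rw [← h1, ← h2]

-- same-index deletion from two equal-length lists gives equal results iff they differ at most at j
theorem deldel_eq_iff (xs ys : List Char) (j : Nat)
    (hlen : ys.length = xs.length) (hj : j + 1 < xs.length) :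
    (ys.take j ++ ys.drop (j + 1) = xs.take j ++ xs.drop (j + 1)) ↔
      (j ≤ bScan xs ys ∧ xs.length - 1 - j ≤ bScan xs.reverse ys.reverse) := by
  rw [List.append_eq_append_iff_of_size_eq_left (by simp; omega)]
  constructor
  · rintro ⟨h1, h2⟩
    refine ⟨(bScan_take_iff xs ys j (by omega) (by omega)).mp h1.symm, ?_⟩
    have := (drop_eq_iff xs ys (j + 1) (j + 1) (by omega) (by omega) (by omega)).mp h2.symm
    omega
  · rintro ⟨hp, hs⟩
    exact ⟨((bScan_take_iff xs ys j (by omega) (by omega)).mpr hp).symm,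
           ((drop_eq_iff xs ys (j + 1) (j + 1) (by omega) (by omega) (by omega)).mpr (by omega)).symm⟩

theorem cond1_eq (oc nc : List Char) :
    ((PySem.List.pyRange 0 ((oc.length : Int) - 1) 1).any (fun i =>
        nc == PySem.List.slice oc none (some i) ++ PySem.List.slice oc (some (i + 1)) none))
    = (((nc.length : Int) == (oc.length : Int) - 1) &&
       decide (max 0 ((oc.length : Int) - 1 - (bScan oc.reverse nc.reverse : Int))
         ≤ min (bScan oc nc : Int) ((oc.length : Int) - 2))) := by
  rw [Bool.eq_iff_iff]
  simp only [List.any_eq_true, PySem.List.mem_pyRange_one, beq_iff_eq, Bool.and_eq_true,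
    decide_eq_true_eq]
  constructor
  · rintro ⟨i, ⟨h0, hi⟩, heq⟩
    rw [PySem.List.slice_to oc (by omega), PySem.List.slice_from oc (by omega)] at heq
    have hiv : (i + 1).toNat = i.toNat + 1 := by omega
    rw [hiv] at heq
    have := (del_eq_iff oc nc i.toNat (by omega)).mp heq
    constructor
    · omega
    · omega
  · rintro ⟨hN, hint⟩
    have hL2 : (2 : Int) ≤ oc.length := by omega
    refine ⟨(((oc.length : Int) - 1 - (bScan oc.reverse nc.reverse : Int)).toNat : Nat), ⟨by omega, by omega⟩, ?_⟩
    rw [PySem.List.slice_to oc (by omega), PySem.List.slice_from oc (by omega)]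
    have h1 : ((((oc.length : Int) - 1 - (bScan oc.reverse nc.reverse : Int)).toNat : Nat) : Int).toNat
        = ((oc.length : Int) - 1 - (bScan oc.reverse nc.reverse : Int)).toNat := by omega
    have h2 : (((((oc.length : Int) - 1 - (bScan oc.reverse nc.reverse : Int)).toNat : Nat) : Int) + 1).toNat
        = ((oc.length : Int) - 1 - (bScan oc.reverse nc.reverse : Int)).toNat + 1 := by omega
    rw [h1, h2]
    exact (del_eq_iff oc nc _ (by omega)).mpr ⟨by omega, by omega, by omega⟩

theorem cond2_eq (oc nc : List Char) :
    ((((oc.length : Int) - (nc.length : Int)).natAbs == 0) &&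
      (PySem.List.pyRange 0 ((oc.length : Int) - 1) 1).any (fun i =>
        PySem.List.slice nc none (some i) ++ PySem.List.slice nc (some (i + 1)) none
          == PySem.List.slice oc none (some i) ++ PySem.List.slice oc (some (i + 1)) none))
    = (((nc.length : Int) == (oc.length : Int)) &&
       decide (max 0 ((oc.length : Int) - 1 - (bScan oc.reverse nc.reverse : Int))
         ≤ min (bScan oc nc : Int) ((oc.length : Int) - 2))) := by
  rw [Bool.eq_iff_iff]
  simp only [List.any_eq_true, PySem.List.mem_pyRange_one, beq_iff_eq, Bool.and_eq_true,
    decide_eq_true_eq]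
  constructor
  · rintro ⟨hab, i, ⟨h0, hi⟩, heq⟩
    have hlen : nc.length = oc.length := by omega
    rw [PySem.List.slice_to nc (by omega), PySem.List.slice_from nc (by omega),
        PySem.List.slice_to oc (by omega), PySem.List.slice_from oc (by omega)] at heq
    have hiv : (i + 1).toNat = i.toNat + 1 := by omega
    rw [hiv] at heq
    have := (deldel_eq_iff oc nc i.toNat hlen (by omega)).mp heq
    constructor
    · omega
    · omega
  · rintro ⟨hN, hint⟩
    have hlen : nc.length = oc.length := by omega
    refine ⟨by omega, (((oc.length : Int) - 1 - (bScan oc.reverse nc.reverse : Int)).toNat : Nat), ⟨by omega, by omega⟩, ?_⟩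
    rw [PySem.List.slice_to nc (by omega), PySem.List.slice_from nc (by omega),
        PySem.List.slice_to oc (by omega), PySem.List.slice_from oc (by omega)]
    have h1 : ((((oc.length : Int) - 1 - (bScan oc.reverse nc.reverse : Int)).toNat : Nat) : Int).toNat
        = ((oc.length : Int) - 1 - (bScan oc.reverse nc.reverse : Int)).toNat := by omega
    have h2 : (((((oc.length : Int) - 1 - (bScan oc.reverse nc.reverse : Int)).toNat : Nat) : Int) + 1).toNat
        = ((oc.length : Int) - 1 - (bScan oc.reverse nc.reverse : Int)).toNat + 1 := by omega
    rw [h1, h2]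
    exact (deldel_eq_iff oc nc _ hlen (by omega)).mpr ⟨by omega, by omega⟩

theorem cond3_eq (oc nc : List Char) :
    ((PySem.List.pyRange 0 ((oc.length : Int) - 1) 1).any (fun i =>
        oc == PySem.List.slice nc none (some i) ++ PySem.List.slice nc (some (i + 1)) none))
    = (((nc.length : Int) == (oc.length : Int) + 1) &&
       decide (max 0 ((oc.length : Int) - (bScan oc.reverse nc.reverse : Int))
         ≤ min (bScan oc nc : Int) ((oc.length : Int) - 2))) := by
  rw [Bool.eq_iff_iff]
  simp only [List.any_eq_true, PySem.List.mem_pyRange_one, beq_iff_eq, Bool.and_eq_true,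
    decide_eq_true_eq]
  constructor
  · rintro ⟨i, ⟨h0, hi⟩, heq⟩
    rw [PySem.List.slice_to nc (by omega), PySem.List.slice_from nc (by omega)] at heq
    have hiv : (i + 1).toNat = i.toNat + 1 := by omega
    rw [hiv] at heq
    by_cases hcase : i.toNat + 1 < nc.length
    · have := (del_eq_iff nc oc i.toNat hcase).mp heq
      rw [bScan_comm nc oc, bScan_comm nc.reverse oc.reverse] at this
      constructor
      · omega
      · omega
    · exfalso
      have hlen : oc.length = (nc.take i.toNat ++ nc.drop (i.toNat + 1)).length := by rw [heq]
      simp at hlen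
      omega
  · rintro ⟨hN, hint⟩
    refine ⟨(((oc.length : Int) - (bScan oc.reverse nc.reverse : Int)).toNat : Nat), ⟨by omega, by omega⟩, ?_⟩
    rw [PySem.List.slice_to nc (by omega), PySem.List.slice_from nc (by omega)]
    have h1 : ((((oc.length : Int) - (bScan oc.reverse nc.reverse : Int)).toNat : Nat) : Int).toNat
        = ((oc.length : Int) - (bScan oc.reverse nc.reverse : Int)).toNat := by omega
    have h2 : (((((oc.length : Int) - (bScan oc.reverse nc.reverse : Int)).toNat : Nat) : Int) + 1).toNat
        = ((oc.length : Int) - (bScan oc.reverse nc.reverse : Int)).toNat + 1 := by omega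
    rw [h1, h2]
    have := (del_eq_iff nc oc (((oc.length : Int) - (bScan oc.reverse nc.reverse : Int)).toNat) (by omega)).mpr
      ⟨by omega, by rw [bScan_comm nc oc]; omega, by rw [bScan_comm nc.reverse oc.reverse]; omega⟩
    exact this

-- A-side characterisation: the three branch conditions as propositions on p and s
def PAa (oc nc : List Char) : Prop :=
  ((nc.length : Int) = (oc.length : Int) - 1 ∧
    max 0 ((oc.length : Int) - 1 - (bScan oc.reverse nc.reverse : Int))
      ≤ min (bScan oc nc : Int) ((oc.length : Int) - 2))
  ∨ ((nc.length : Int) = (oc.length : Int) ∧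
    max 0 ((oc.length : Int) - 1 - (bScan oc.reverse nc.reverse : Int))
      ≤ min (bScan oc nc : Int) ((oc.length : Int) - 2))
  ∨ ((nc.length : Int) = (oc.length : Int) + 1 ∧
    max 0 ((oc.length : Int) - (bScan oc.reverse nc.reverse : Int))
      ≤ min (bScan oc nc : Int) ((oc.length : Int) - 2))

-- B-side characterisation: "within one edit" as propositions on p and s
def PBc (oc nc : List Char) : Prop :=
  ((nc.length : Int) = (oc.length : Int) - 1 ∧
    (oc.length : Int) - 1 - (bScan oc.reverse nc.reverse : Int) ≤ (bScan oc nc : Int))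
  ∨ ((nc.length : Int) = (oc.length : Int) ∧
    (oc.length : Int) - 1 - (bScan oc.reverse nc.reverse : Int) ≤ (bScan oc nc : Int))
  ∨ ((nc.length : Int) = (oc.length : Int) + 1 ∧
    (oc.length : Int) - (bScan oc.reverse nc.reverse : Int) ≤ (bScan oc nc : Int))

theorem A_false_iff (o n : String) : check6 o n = false ↔ PAa o.toList n.toList := by
  unfold check6
  rw [cond1_eq, cond2_eq, cond3_eq]
  unfold PAa
  split_ifs with h1 h2 h3
  · simp only [Bool.and_eq_true, beq_iff_eq, decide_eq_true_eq] at h1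
    simp only [true_iff]
    exact Or.inl h1
  · simp only [Bool.and_eq_true, beq_iff_eq, decide_eq_true_eq] at h2
    simp only [true_iff]
    exact Or.inr (Or.inl h2)
  · simp only [Bool.and_eq_true, beq_iff_eq, decide_eq_true_eq] at h3
    simp only [true_iff]
    exact Or.inr (Or.inr h3)
  · simp only [Bool.and_eq_true, beq_iff_eq, decide_eq_true_eq, not_and] at h1 h2 h3
    simp only [Bool.true_eq_false, false_iff]
    rintro (⟨e, P⟩ | ⟨e, P⟩ | ⟨e, P⟩)
    · exact h1 e P
    · exact h2 e P
    · exact h3 e P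

theorem eq_iff_len_le_bScan (xs ys : List Char) (h : xs.length = ys.length) :
    xs = ys ↔ xs.length ≤ bScan xs ys := by
  constructor
  · intro he; subst he; rw [bScan_self]
  · intro hle
    have := (bScan_take_iff xs ys xs.length le_rfl (by omega)).mpr hle
    rwa [List.take_length, h, List.take_length] at this

-- oc = nc minus its last character  (|nc| = |oc|+1)
theorem dropLast_eq_iff' (oc nc : List Char) (hlen : nc.length = oc.length + 1) :
    nc.dropLast = oc ↔ oc.length ≤ bScan oc nc := by
  rw [List.dropLast_eq_take]
  have h1 : oc.take oc.length = oc := List.take_length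
  constructor
  · intro h
    have : oc.take oc.length = nc.take oc.length := by
      rw [h1, show oc.length = nc.length - 1 by omega, h]
    exact (bScan_take_iff oc nc oc.length le_rfl (by omega)).mp this
  · intro h
    have := (bScan_take_iff oc nc oc.length le_rfl (by omega)).mpr h
    rw [h1] at this
    rw [show nc.length - 1 = oc.length by omega]
    exact this.symm

theorem dropLast_prefix_iff (oc nc : List Char) (h : oc.length - 1 ≤ nc.length) :
    oc.dropLast <+: nc ↔ oc.length - 1 ≤ bScan oc nc := by
  rw [List.prefix_iff_eq_take, List.length_dropLast, List.dropLast_eq_take]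
  exact bScan_take_iff oc nc (oc.length - 1) (by omega) h

theorem suffix_drop_iff (oc nc : List Char) (k : Nat)
    (hk1 : k ≤ oc.length) (hk2 : k ≤ nc.length) :
    nc.drop (nc.length - k) <:+ oc ↔ k ≤ bScan oc.reverse nc.reverse := by
  rw [← List.reverse_prefix, List.reverse_drop,
    show nc.length - (nc.length - k) = k from by omega,
    List.prefix_iff_eq_take, List.length_take, List.length_reverse,
    show min k nc.length = k from by omega]
  constructor
  · intro he
    exact (bScan_take_iff oc.reverse nc.reverse k (by simpa using hk1)
      (by simpa using hk2)).mp he.symm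
  · intro hle
    exact ((bScan_take_iff oc.reverse nc.reverse k (by simpa using hk1)
      (by simpa using hk2)).mpr hle).symm

theorem D_iff (o n : String) :
    D_check6 o n ↔ PBc o.toList n.toList ∧ ¬ PAa o.toList n.toList := by
  simp only [D_check6, PBc, PAa]
  have hpl := bScan_le_left o.toList n.toList
  have hpr := bScan_le_right o.toList n.toList
  have hsl := bScan_le_left o.toList.reverse n.toList.reverse
  have hsr := bScan_le_right o.toList.reverse n.toList.reverse
  rw [List.length_reverse] at hsl
  rw [List.length_reverse] at hsr
  constructor
  · rintro (⟨hle, hpre, hlast⟩ | ⟨hlen, hpre, hsuf2⟩)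
    · -- one edit (deletion or substitution) at the final position
      have hge : o.toList.length - 1 ≤ n.toList.length := by
        have := hpre.length_le
        rwa [List.length_dropLast] at this
      have hp1 : o.toList.length - 1 ≤ bScan o.toList n.toList :=
        (dropLast_prefix_iff o.toList n.toList hge).mp hpre
      have hcase : o.toList.length ≤ 1 ∨ bScan o.toList.reverse n.toList.reverse = 0 := by
        rcases hlast with h | h
        · exact Or.inl h
        · rcases Nat.eq_zero_or_pos n.toList.length with h0 | h0
          · exact Or.inl (by omega)
          · right
            by_contra hs
            exact h ((suffix_drop_iff o.toList n.toList 1 (by omega) h0).mpr (by omega))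
      by_cases heq : n.toList.length = o.toList.length
      · refine ⟨Or.inr (Or.inl ⟨by omega, ?_⟩), ?_⟩
        · rcases hcase with h | h <;> omega
        · rintro (⟨e, P⟩ | ⟨e, P⟩ | ⟨e, P⟩)
          · omega
          · rcases hcase with h | h <;> omega
          · omega
      · refine ⟨Or.inl ⟨by omega, ?_⟩, ?_⟩
        · rcases hcase with h | h <;> omega
        · rintro (⟨e, P⟩ | ⟨e, P⟩ | ⟨e, P⟩)
          · rcases hcase with h | h <;> omega
          · omega
          · omega
    · -- insertion at one of the final two positions of n
      rcases Nat.eq_zero_or_pos o.toList.length with h0 | h0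
      · refine ⟨Or.inr (Or.inr ⟨by omega, by omega⟩), ?_⟩
        rintro (⟨e, P⟩ | ⟨e, P⟩ | ⟨e, P⟩) <;> omega
      · have hs2 : bScan o.toList.reverse n.toList.reverse ≤ 1 := by
          by_contra hs
          exact hsuf2 ((suffix_drop_iff o.toList n.toList 2 (by omega) (by omega)).mpr
            (by omega))
        have hp : o.toList.length - bScan o.toList.reverse n.toList.reverse
            ≤ bScan o.toList n.toList := by
          rcases hpre with h | ⟨h1, h2⟩
          · have hdl : n.toList.dropLast = o.toList :=
              h.eq_of_length_le (by rw [List.length_dropLast]; omega)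
            have := (dropLast_eq_iff' o.toList n.toList hlen).mp hdl
            omega
          · have hq := (dropLast_prefix_iff o.toList n.toList (by omega)).mp h1
            have hs1 := (suffix_drop_iff o.toList n.toList 1 (by omega) (by omega)).mp h2
            omega
        refine ⟨Or.inr (Or.inr ⟨by omega, by omega⟩), ?_⟩
        rintro (⟨e, P⟩ | ⟨e, P⟩ | ⟨e, P⟩)
        · omega
        · omega
        · omega
  · rintro ⟨hB, hA⟩
    rcases hB with ⟨hlen, hb⟩ | ⟨hlen, hb⟩ | ⟨hlen, hb⟩
    · -- deletion case
      left
      have hnA : ¬ (max 0 ((o.toList.length : Int) - 1 - (bScan o.toList.reverse n.toList.reverse : Int))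
          ≤ min (bScan o.toList n.toList : Int) ((o.toList.length : Int) - 2)) := by
        intro hP
        exact hA (Or.inl ⟨hlen, hP⟩)
      have hcase : bScan o.toList.reverse n.toList.reverse = 0 ∨ o.toList.length ≤ 1 := by
        omega
      refine ⟨by omega, ?_, ?_⟩
      · refine (dropLast_prefix_iff o.toList n.toList (by omega)).mpr ?_
        rcases hcase with h | h <;> omega
      · rcases Nat.eq_zero_or_pos n.toList.length with h0 | h0
        · exact Or.inl (by omega)
        · right
          intro hsf
          have := (suffix_drop_iff o.toList n.toList 1 (by omega) h0).mp hsf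
          rcases hcase with h | h <;> omega
    · -- same-length case
      left
      have hnA : ¬ (max 0 ((o.toList.length : Int) - 1 - (bScan o.toList.reverse n.toList.reverse : Int))
          ≤ min (bScan o.toList n.toList : Int) ((o.toList.length : Int) - 2)) := by
        intro hP
        exact hA (Or.inr (Or.inl ⟨hlen, hP⟩))
      have hcase : bScan o.toList.reverse n.toList.reverse = 0 ∨ o.toList.length ≤ 1 := by
        omega
      refine ⟨by omega, ?_, ?_⟩
      · refine (dropLast_prefix_iff o.toList n.toList (by omega)).mpr ?_
        rcases hcase with h | h <;> omega
      · rcases hcase with h | h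
        · rcases Nat.eq_zero_or_pos o.toList.length with h0 | h0
          · exact Or.inl (by omega)
          · right
            intro hsf
            have := (suffix_drop_iff o.toList n.toList 1 h0 (by omega)).mp hsf
            omega
        · exact Or.inl h
    · -- insertion case
      right
      have hnA : ¬ (max 0 ((o.toList.length : Int) - (bScan o.toList.reverse n.toList.reverse : Int))
          ≤ min (bScan o.toList n.toList : Int) ((o.toList.length : Int) - 2)) := by
        intro hP
        exact hA (Or.inr (Or.inr ⟨hlen, hP⟩))
      have hcase : bScan o.toList.reverse n.toList.reverse ≤ 1 ∨ o.toList.length ≤ 1 := by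
        omega
      refine ⟨by omega, ?_, ?_⟩
      · by_cases hpfull : o.toList.length ≤ bScan o.toList n.toList
        · left
          have hdl : n.toList.dropLast = o.toList :=
            (dropLast_eq_iff' o.toList n.toList (by omega)).mpr hpfull
          rw [hdl]
        · right
          have hs1 : 1 ≤ bScan o.toList.reverse n.toList.reverse := by omega
          refine ⟨(dropLast_prefix_iff o.toList n.toList (by omega)).mpr (by omega), ?_⟩
          exact (suffix_drop_iff o.toList n.toList 1 (by omega) (by omega)).mpr hs1
      · intro hsf
        by_cases hlo2 : 2 ≤ o.toList.length
        · have := (suffix_drop_iff o.toList n.toList 2 hlo2 (by omega)).mp hsf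
          omega
        · have := hsf.length_le
          rw [List.length_drop] at this
          omega

theorem B_false_iff (o n : String) : check6_alt o n = false ↔ PBc o.toList n.toList := by
  unfold check6_alt PBc
  have hpl := bScan_le_left o.toList n.toList
  have hpr := bScan_le_right o.toList n.toList
  by_cases hlt : o.toList.length < n.toList.length
  · simp only [hlt, if_true]
    by_cases hbig : ((n.toList.length : Int) - (o.toList.length : Int) > 1)
    · simp only [hbig, if_true]
      simp only [Bool.true_eq_false, false_iff]
      rintro (⟨e, _⟩ | ⟨e, _⟩ | ⟨e, _⟩) <;> omega
    · have hlen : n.toList.length = o.toList.length + 1 := by omega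
      simp only [hbig, if_false]
      have hne : ¬ (n.toList.length = o.toList.length) := by omega
      simp only [hne, if_false]
      have hp' : bScan n.toList o.toList = bScan o.toList n.toList := bScan_comm _ _
      rw [hp']
      have hidx : (((bScan o.toList n.toList : Int) + 1)).toNat = bScan o.toList n.toList + 1 := by
        omega
      rw [PySem.List.slice_from n.toList (by omega), PySem.List.slice_from o.toList (by omega),
        hidx, Int.toNat_natCast]
      simp only [Bool.not_eq_false', beq_iff_eq]
      rw [drop_eq_iff n.toList o.toList (bScan o.toList n.toList + 1) (bScan o.toList n.toList)
        (by omega) (by omega) (by omega)]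
      rw [bScan_comm n.toList.reverse o.toList.reverse]
      constructor
      · intro h
        exact Or.inr (Or.inr ⟨by omega, by omega⟩)
      · rintro (⟨e, P⟩ | ⟨e, P⟩ | ⟨e, P⟩) <;> omega
  · simp only [hlt, if_false]
    by_cases hbig : ((o.toList.length : Int) - (n.toList.length : Int) > 1)
    · simp only [hbig, if_true]
      simp only [Bool.true_eq_false, false_iff]
      rintro (⟨e, _⟩ | ⟨e, _⟩ | ⟨e, _⟩) <;> omega
    · simp only [hbig, if_false]
      by_cases heq : o.toList.length = n.toList.length
      · simp only [heq, if_true]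
        have hidx : (((bScan o.toList n.toList : Int) + 1)).toNat = bScan o.toList n.toList + 1 := by
          omega
        rw [PySem.List.slice_from o.toList (by omega), PySem.List.slice_from n.toList (by omega),
          hidx]
        simp only [Bool.not_eq_false', beq_iff_eq]
        by_cases hfull : o.toList.length ≤ bScan o.toList n.toList
        · have hoceq : o.toList = n.toList := (eq_iff_len_le_bScan o.toList n.toList heq).mpr hfull
          have hs : bScan o.toList.reverse n.toList.reverse = o.toList.length := by
            rw [hoceq, bScan_self, List.length_reverse]
          constructor
          · intro _
            exact Or.inr (Or.inl ⟨trivial, by omega⟩)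
          · intro _
            rw [hoceq]
        · rw [drop_eq_iff o.toList n.toList (bScan o.toList n.toList + 1)
            (bScan o.toList n.toList + 1) (by omega) (by omega) (by omega)]
          constructor
          · intro h
            exact Or.inr (Or.inl ⟨trivial, by omega⟩)
          · rintro (⟨e, P⟩ | ⟨e, P⟩ | ⟨e, P⟩) <;> omega
      · have hlen : n.toList.length + 1 = o.toList.length := by omega
        simp only [heq, if_false]
        have hidx : (((bScan o.toList n.toList : Int) + 1)).toNat = bScan o.toList n.toList + 1 := by
          omega
        rw [PySem.List.slice_from o.toList (by omega), PySem.List.slice_from n.toList (by omega),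
          hidx, Int.toNat_natCast]
        simp only [Bool.not_eq_false', beq_iff_eq]
        rw [drop_eq_iff o.toList n.toList (bScan o.toList n.toList + 1) (bScan o.toList n.toList)
          (by omega) (by omega) (by omega)]
        constructor
        · intro h
          exact Or.inl ⟨by omega, by omega⟩
        · rintro (⟨e, P⟩ | ⟨e, P⟩ | ⟨e, P⟩) <;> omega

theorem PAa_implies_PBc (oc nc : List Char) (h : PAa oc nc) : PBc oc nc := by
  unfold PAa at h
  unfold PBc
  rcases h with ⟨e, P⟩ | ⟨e, P⟩ | ⟨e, P⟩
  · exact Or.inl ⟨e, by omega⟩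
  · exact Or.inr (Or.inl ⟨e, by omega⟩)
  · exact Or.inr (Or.inr ⟨e, by omega⟩)

-- ===== VERDICT (by name: the statements are the Claim_ definitions above) =====
theorem check6_spec : Claim_unchanged_check6 := by
  intro o n _ hD
  show check6 o n = check6_alt o n
  by_cases hA : PAa o.toList n.toList
  · rw [(A_false_iff o n).mpr hA, ((B_false_iff o n).mpr (PAa_implies_PBc _ _ hA)).symm]
  · have hB : ¬ PBc o.toList n.toList := by
      intro hB
      exact hD ((D_iff o n).mpr ⟨hB, hA⟩)
    have h1 : check6 o n = true := by
      cases h : check6 o n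
      · exact absurd ((A_false_iff o n).mp h) hA
      · rfl
    have h2 : check6_alt o n = true := by
      cases h : check6_alt o n
      · exact absurd ((B_false_iff o n).mp h) hB
      · rfl
    rw [h1, h2]

theorem check6_changed : Claim_changed_check6 := by unfold Claim_changed_check6; decide

theorem check6_tight : Claim_exact_check6 := by
  intro o n _ hD
  obtain ⟨hB, hA⟩ := (D_iff o n).mp hD
  have h1 : check6 o n = true := by
    cases h : check6 o n
    · exact absurd ((A_false_iff o n).mp h) hA
    · rfl
  rw [h1, (B_false_iff o n).mpr hB]
  simp
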